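-- pv_equiv track=rewrite | github.com/octoenergy/timeserio | timeserio/keras/timing.py | absolute_latencies
-- ===== SOURCE A (Python) =====
-- def absolute_latencies(relative_latencies):
--     """
--     Compute absolute delay + stride for a each in a stack of layers.
--
--     Arguments:
--     ----------
--     relative_latencies: list of tuples
--         each tuple is (rel_delay, rel_stride)
--
--     Returns:
--     --------
--     absolute_latencies: list of tuples
--         each tuple is (abs_stride, abs_stride)
--
--     """
--     abs_delay, abs_stride = 0, 1
--     absolute_latencies = []
--     for idx, (rel_delay, rel_stride) in enumerate(relative_latencies):
--         abs_delay += abs_stride * rel_delay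
--         abs_stride *= rel_stride
--         absolute_latencies.append((abs_delay, abs_stride))
--     return absolute_latencies
-- ===== SOURCE B (Python) =====
-- def absolute_latencies(relative_latencies):
--     # two-pass decomposition: build the stride table first, then accumulate delays
--     strides = [1]
--     for _, rel_stride in relative_latencies:
--         strides.append(strides[-1] * rel_stride)
--     delays = [0]
--     for (rel_delay, _), stride_before in zip(relative_latencies, strides):
--         delays.append(delays[-1] + stride_before * rel_delay)
--     return list(zip(delays[1:], strides[1:]))
-- ===== Notes on version B (the rewrite author's own statement) =====
-- stated objective: alternative
-- what changed: Replaces the single interleaved loop carrying (delay, stride) state with two separate scans: first a prefix-product stride table seeded with 1, then a running sum of stride_before*rel_delay seeded with 0, finally zipping the two shifted tables.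
import Mathlib
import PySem

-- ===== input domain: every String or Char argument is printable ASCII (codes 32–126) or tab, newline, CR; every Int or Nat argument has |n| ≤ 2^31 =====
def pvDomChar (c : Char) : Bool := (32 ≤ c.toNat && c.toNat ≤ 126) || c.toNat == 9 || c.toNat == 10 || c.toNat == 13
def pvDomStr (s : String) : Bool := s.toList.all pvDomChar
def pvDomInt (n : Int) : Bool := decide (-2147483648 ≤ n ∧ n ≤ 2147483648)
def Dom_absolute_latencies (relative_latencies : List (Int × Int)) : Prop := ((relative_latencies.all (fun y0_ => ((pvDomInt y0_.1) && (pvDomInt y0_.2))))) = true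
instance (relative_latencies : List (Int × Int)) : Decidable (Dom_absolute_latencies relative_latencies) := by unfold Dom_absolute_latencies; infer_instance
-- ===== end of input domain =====

-- ===== PORT A =====
-- one interleaved loop over (abs_delay, abs_stride, acc), appending each updated pair
def absolute_latencies (relative_latencies : List (Int × Int)) : List (Int × Int) :=
  (relative_latencies.foldl
    (fun (st : Int × Int × List (Int × Int)) (p : Int × Int) =>
      let abs_delay := st.1 + st.2.1 * p.1
      let abs_stride := st.2.1 * p.2
      (abs_delay, abs_stride, st.2.2 ++ [(abs_delay, abs_stride)]))
    (0, 1, [])).2.2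

-- ===== PORT B =====
-- B: stride prefix-product table first, then a running-sum delay table, zipped (shifted by one)
def absolute_latencies_alt (relative_latencies : List (Int × Int)) : List (Int × Int) :=
  let strides := List.scanl (· * ·) 1 (relative_latencies.map Prod.snd)
  let delays := List.scanl (fun d (q : (Int × Int) × Int) => d + q.2 * q.1.1) 0
    (relative_latencies.zip strides)
  delays.tail.zip strides.tail

-- ===== PRECONDITION & SPEC =====
def Spec_absolute_latencies (relative_latencies : List (Int × Int)) (out : List (Int × Int)) : Prop := out = absolute_latencies_alt relative_latencies
instance (relative_latencies : List (Int × Int)) (out : List (Int × Int)) : Decidable (Spec_absolute_latencies relative_latencies out) := by unfold Spec_absolute_latencies; infer_instance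

-- ===== CLAIM (what is proved, stated in full; the proofs are below) =====
def Claim_equal_absolute_latencies : Prop := ∀ (relative_latencies : List (Int × Int)), Dom_absolute_latencies relative_latencies → Spec_absolute_latencies relative_latencies (absolute_latencies relative_latencies)

-- ===== LEMMAS AND PROOFS =====

theorem latencies_loop_eq (rl : List (Int × Int)) (d s : Int) (acc : List (Int × Int)) :
    (rl.foldl
      (fun (st : Int × Int × List (Int × Int)) (p : Int × Int) =>
        let abs_delay := st.1 + st.2.1 * p.1
        let abs_stride := st.2.1 * p.2
        (abs_delay, abs_stride, st.2.2 ++ [(abs_delay, abs_stride)]))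
      (d, s, acc)).2.2 =
    acc ++
      ((List.scanl (fun dd (q : (Int × Int) × Int) => dd + q.2 * q.1.1) d
          (rl.zip (List.scanl (· * ·) s (rl.map Prod.snd)))).tail.zip
        (List.scanl (· * ·) s (rl.map Prod.snd)).tail) := by
  induction rl generalizing d s acc with
  | nil => simp [List.scanl]
  | cons hd tl ih =>
    obtain ⟨rd, rs⟩ := hd
    simp only [List.foldl_cons, List.map_cons, List.scanl]
    rw [ih]
    cases tl with
    | nil => simp [List.scanl]
    | cons h2 t2 =>
      simp [List.scanl, List.append_assoc]


-- ===== VERDICT (by name: the statement is the Claim_ definition above) =====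
theorem absolute_latencies_spec : Claim_equal_absolute_latencies := by
  intro rl _
  show absolute_latencies rl = absolute_latencies_alt rl
  simpa [absolute_latencies, absolute_latencies_alt] using latencies_loop_eq rl 0 1 []
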